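-- pv_equiv track=rewrite | github.com/EachSheep/RAGSynth | knowledge_enhancement/rag/utils/metric_calculator.py | compute_list_operations
-- ===== SOURCE A (Python) =====
-- def compute_list_operations(dict1, dict2):
--     intersection = {}
--     for key in dict1:
--         if key in dict2:
--             common_elements = list(set(dict1[key]) & set(dict2[key]))
--             if common_elements:
--                 intersection[key] = common_elements
--
--     dict1_minus_dict2 = {}
--     for key in dict1:
--         if key not in dict2:
--             dict1_minus_dict2[key] = dict1[key]
--         else:
--             difference = list(set(dict1[key]) - set(dict2[key]))
--             if difference:
--                 dict1_minus_dict2[key] = difference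
--
--     dict2_minus_dict1 = {}
--     for key in dict2:
--         if key not in dict1:
--             dict2_minus_dict1[key] = dict2[key]
--         else:
--             difference = list(set(dict2[key]) - set(dict1[key]))
--             if difference:
--                 dict2_minus_dict1[key] = difference
--
--     intersection_length = sum(len(v) for v in intersection.values())
--     dict1_minus_dict2_length = sum(len(v) for v in dict1_minus_dict2.values())
--     dict2_minus_dict1_length = sum(len(v) for v in dict2_minus_dict1.values())
--
--     return intersection_length, dict1_minus_dict2_length, dict2_minus_dict1_length
-- ===== SOURCE B (Python) =====
-- def compute_list_operations(dict1, dict2):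
--     # Inclusion-exclusion: for a shared key, with n1=|set(v1)|, n2=|set(v2)| and
--     # u=|set(v1+v2)|, we have |inter|=n1+n2-u, |v1-v2|=u-n2, |v2-v1|=u-n1,
--     # so no set intersection/difference is ever computed.
--     inter = 0
--     d1m2 = 0
--     d2m1 = 0
--     for key, v1 in dict1.items():
--         v2 = dict2.get(key)
--         if v2 is None:
--             d1m2 += len(v1)
--         else:
--             n1 = len(set(v1))
--             n2 = len(set(v2))
--             u = len(set(v1 + v2))
--             inter += n1 + n2 - u
--             d1m2 += u - n2
--             d2m1 += u - n1
--     for key, v2 in dict2.items():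
--         if key not in dict1:
--             d2m1 += len(v2)
--     return inter, d1m2, d2m1
-- ===== Notes on version B (the rewrite author's own statement) =====
-- stated objective: alternative
-- what changed: B never computes a set intersection or difference: it uses inclusion-exclusion on deduplicated sizes (|A&B|=n1+n2-u, |A-B|=u-n2, |B-A|=u-n1 with u the size of set(v1+v2)), accumulates all three counters while sweeping dict1 (shared keys contribute to d2m1 there too), and sweeps dict2 only for keys absent from dict1, instead of A's three staged result dicts of materialized set operations that are then summed.
import Mathlib
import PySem

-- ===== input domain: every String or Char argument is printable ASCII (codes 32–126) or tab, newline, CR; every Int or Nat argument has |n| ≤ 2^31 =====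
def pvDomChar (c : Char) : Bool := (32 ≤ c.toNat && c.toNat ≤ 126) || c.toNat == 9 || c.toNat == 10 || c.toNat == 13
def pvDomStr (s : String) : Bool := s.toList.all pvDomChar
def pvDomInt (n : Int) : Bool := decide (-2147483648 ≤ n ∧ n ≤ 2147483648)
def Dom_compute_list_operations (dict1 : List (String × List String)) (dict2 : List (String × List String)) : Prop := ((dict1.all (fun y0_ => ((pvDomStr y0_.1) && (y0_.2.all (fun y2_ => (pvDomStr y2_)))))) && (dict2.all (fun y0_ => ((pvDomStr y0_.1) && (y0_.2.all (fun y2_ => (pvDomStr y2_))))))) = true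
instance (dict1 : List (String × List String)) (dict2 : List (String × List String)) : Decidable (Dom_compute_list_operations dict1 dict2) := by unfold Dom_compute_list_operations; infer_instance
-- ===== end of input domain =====

-- B replaces A's materialized set intersections/differences (staged into three result dicts, then
-- summed) by inclusion-exclusion on deduplicated sizes, accumulated in counters; return values only.

-- ===== PORT A =====
def compute_list_operations (dict1 : List (String × List String)) (dict2 : List (String × List String)) : Int × Int × Int :=
  let d1 : PySem.Dict String (List String) := PySem.Dict.ofList dict1
  let d2 : PySem.Dict String (List String) := PySem.Dict.ofList dict2
  let intersection :=
    d1.keys.foldl (fun acc key =>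
      if d2.contains key then
        let common_elements := PySem.Set.inter (PySem.Set.ofList (d1.getD key [])) (PySem.Set.ofList (d2.getD key []))
        if common_elements ≠ [] then acc.insert key common_elements else acc
      else acc) PySem.Dict.empty
  let dict1_minus_dict2 :=
    d1.keys.foldl (fun acc key =>
      if ¬ d2.contains key then acc.insert key (d1.getD key [])
      else
        let difference := PySem.Set.diff (PySem.Set.ofList (d1.getD key [])) (PySem.Set.ofList (d2.getD key []))
        if difference ≠ [] then acc.insert key difference else acc) PySem.Dict.empty
  let dict2_minus_dict1 :=
    d2.keys.foldl (fun acc key =>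
      if ¬ d1.contains key then acc.insert key (d2.getD key [])
      else
        let difference := PySem.Set.diff (PySem.Set.ofList (d2.getD key [])) (PySem.Set.ofList (d1.getD key []))
        if difference ≠ [] then acc.insert key difference else acc) PySem.Dict.empty
  let intersection_length := (intersection.values.map PySem.List.len).sum
  let dict1_minus_dict2_length := (dict1_minus_dict2.values.map PySem.List.len).sum
  let dict2_minus_dict1_length := (dict2_minus_dict1.values.map PySem.List.len).sum
  (intersection_length, dict1_minus_dict2_length, dict2_minus_dict1_length)

-- ===== PORT B =====
def compute_list_operations_alt (dict1 : List (String × List String)) (dict2 : List (String × List String)) : Int × Int × Int :=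
  let d1 : PySem.Dict String (List String) := PySem.Dict.ofList dict1
  let d2 : PySem.Dict String (List String) := PySem.Dict.ofList dict2
  let t :=
    d1.items.foldl (fun (t : Int × Int × Int) kv =>
      match d2.get? kv.1 with
      | none => (t.1, t.2.1 + PySem.List.len kv.2, t.2.2)
      | some v2 =>
        let n1 := PySem.Set.len (PySem.Set.ofList kv.2)
        let n2 := PySem.Set.len (PySem.Set.ofList v2)
        let u := PySem.Set.len (PySem.Set.ofList (kv.2 ++ v2))
        (t.1 + (n1 + n2 - u), t.2.1 + (u - n2), t.2.2 + (u - n1))) (0, 0, 0)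
  let extra :=
    d2.items.foldl (fun (c : Int) kv =>
      if ¬ d1.contains kv.1 then c + PySem.List.len kv.2 else c) 0
  (t.1, t.2.1, t.2.2 + extra)

-- ===== PRECONDITION & SPEC =====
def Spec_compute_list_operations (dict1 : List (String × List String)) (dict2 : List (String × List String)) (out : Int × Int × Int) : Prop := out = compute_list_operations_alt dict1 dict2
instance (dict1 : List (String × List String)) (dict2 : List (String × List String)) (out : Int × Int × Int) : Decidable (Spec_compute_list_operations dict1 dict2 out) := by unfold Spec_compute_list_operations; infer_instance

-- ===== CLAIM (what is proved, stated in full; the proofs are below) =====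
def Claim_equal_compute_list_operations : Prop := ∀ (dict1 : List (String × List String)) (dict2 : List (String × List String)), Dom_compute_list_operations dict1 dict2 → Spec_compute_list_operations dict1 dict2 (compute_list_operations dict1 dict2)

-- ===== LEMMAS AND PROOFS =====

-- A's three loops all have the shape "maybe insert a value for this key"; pvStepF captures it.
def pvStepF (f : String → Option (List String)) (a : PySem.Dict String (List String)) (k : String) : PySem.Dict String (List String) :=
  match f k with
  | some v => a.insert k v
  | none => a

-- Sum of value lengths of a dict built by inserting at fresh, distinct keys.
theorem pv_sum_foldl (f : String → Option (List String)) :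
    ∀ (L : List String) (acc : PySem.Dict String (List String)), L.Nodup →
      (∀ k ∈ L, acc.contains k = false) →
      (((L.foldl (pvStepF f) acc).values.map PySem.List.len).sum
        = (acc.values.map PySem.List.len).sum
          + (L.map (fun k => PySem.List.len ((f k).getD []))).sum) := by
  intro L
  induction L with
  | nil => intro acc _ _; simp
  | cons k L ih =>
    intro acc hnd hfresh
    have hknotin : k ∉ L := (List.nodup_cons.mp hnd).1
    have hndL : L.Nodup := (List.nodup_cons.mp hnd).2
    have hak : acc.contains k = false := hfresh k (List.mem_cons_self)
    simp only [List.foldl_cons, List.map_cons, List.sum_cons]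
    cases hf : f k with
    | none =>
      have hstep : pvStepF f acc k = acc := by simp [pvStepF, hf]
      rw [hstep, ih acc hndL (fun k' hk' => hfresh k' (List.mem_cons_of_mem _ hk'))]
      simp [PySem.List.len]
    | some v =>
      have hstep : pvStepF f acc k = acc.insert k v := by simp [pvStepF, hf]
      have hitems : (acc.insert k v).items = acc.items ++ [(k, v)] :=
        PySem.Dict.items_insert_of_not_contains acc v hak
      have hfresh' : ∀ k' ∈ L, (acc.insert k v).contains k' = false := by
        intro k' hk'
        have hne : k' ≠ k := fun h => hknotin (h ▸ hk')
        rw [PySem.Dict.contains_insert]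
        simp [hne, hfresh k' (List.mem_cons_of_mem _ hk')]
      rw [hstep, ih (acc.insert k v) hndL hfresh']
      have hvals : (acc.insert k v).values = acc.values ++ [v] := by
        simp only [PySem.Dict.values, hitems, List.map_append, List.map_cons, List.map_nil]
      rw [hvals]
      simp
      ring

-- The per-key contribution of each of A's guarded loops, as an Option-valued step function.
theorem pv_key_sum (dA dB : PySem.Dict String (List String))
    (hndA : dA.keys.Nodup)
    (op : PySem.Set String → PySem.Set String → PySem.Set String) :
    ((dA.keys.foldl (pvStepF (fun k =>
        if dB.contains k then
          let c := op (PySem.Set.ofList (dA.getD k [])) (PySem.Set.ofList (dB.getD k []))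
          if c ≠ [] then some c else none
        else none)) PySem.Dict.empty).values.map PySem.List.len).sum
      = (dA.items.map (fun kv =>
          match dB.get? kv.1 with
          | none => 0
          | some v2 => PySem.Set.len (op (PySem.Set.ofList kv.2) (PySem.Set.ofList v2)))).sum := by
  rw [pv_sum_foldl _ dA.keys PySem.Dict.empty hndA (fun k _ => PySem.Dict.contains_empty k)]
  rw [PySem.Dict.items_eq_map_keys dA hndA [], List.map_map]
  rw [show ((PySem.Dict.empty : PySem.Dict String (List String)).values.map PySem.List.len).sum = 0 from rfl, zero_add]
  apply congrArg List.sum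
  apply List.map_congr_left
  intro k _
  simp only [Function.comp]
  cases h : dB.get? k with
  | none =>
    have hc : dB.contains k = false := by rw [PySem.Dict.contains_eq_isSome_get?, h]; rfl
    simp [hc, PySem.List.len]
  | some v2 =>
    have hc : dB.contains k = true := by rw [PySem.Dict.contains_eq_isSome_get?, h]; rfl
    have hg : dB.getD k [] = v2 := PySem.Dict.getD_of_get?_eq_some dB [] h
    simp only [hc, if_true, hg]
    by_cases he : op (PySem.Set.ofList (dA.getD k [])) (PySem.Set.ofList v2) = []
    · simp [he, PySem.Set.len, PySem.List.len]
    · simp [he, PySem.Set.len, PySem.List.len]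

-- A's second/third loop also fits pvStepF: the "key only in dA" branch inserts the raw list.
theorem pv_key_sum_diff (dA dB : PySem.Dict String (List String))
    (hndA : dA.keys.Nodup) :
    ((dA.keys.foldl (pvStepF (fun k =>
        if ¬ dB.contains k then some (dA.getD k [])
        else
          let c := PySem.Set.diff (PySem.Set.ofList (dA.getD k [])) (PySem.Set.ofList (dB.getD k []))
          if c ≠ [] then some c else none)) PySem.Dict.empty).values.map PySem.List.len).sum
      = (dA.items.map (fun kv =>
          match dB.get? kv.1 with
          | none => PySem.List.len kv.2
          | some v2 => PySem.Set.len (PySem.Set.diff (PySem.Set.ofList kv.2) (PySem.Set.ofList v2)))).sum := by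
  rw [pv_sum_foldl _ dA.keys PySem.Dict.empty hndA (fun k _ => PySem.Dict.contains_empty k)]
  rw [PySem.Dict.items_eq_map_keys dA hndA [], List.map_map]
  rw [show ((PySem.Dict.empty : PySem.Dict String (List String)).values.map PySem.List.len).sum = 0 from rfl, zero_add]
  apply congrArg List.sum
  apply List.map_congr_left
  intro k _
  simp only [Function.comp]
  cases h : dB.get? k with
  | none =>
    have hc : dB.contains k = false := by rw [PySem.Dict.contains_eq_isSome_get?, h]; rfl
    simp [hc, PySem.List.len]
  | some v2 =>
    have hc : dB.contains k = true := by rw [PySem.Dict.contains_eq_isSome_get?, h]; rfl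
    have hg : dB.getD k [] = v2 := PySem.Dict.getD_of_get?_eq_some dB [] h
    simp only [hc, not_true, if_false, hg]
    by_cases he : PySem.Set.diff (PySem.Set.ofList (dA.getD k [])) (PySem.Set.ofList v2) = []
    · simp [he, PySem.Set.len, PySem.List.len]
    · simp [he, PySem.Set.len, PySem.List.len]

-- B's triple-counter fold is the triple of the three per-key sums.
theorem pv_B_loop1 (d2 : PySem.Dict String (List String)) :
    ∀ (L : List (String × List String)) (t : Int × Int × Int),
      L.foldl (fun (t : Int × Int × Int) kv =>
        match d2.get? kv.1 with
        | none => (t.1, t.2.1 + PySem.List.len kv.2, t.2.2)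
        | some v2 =>
          let n1 := PySem.Set.len (PySem.Set.ofList kv.2)
          let n2 := PySem.Set.len (PySem.Set.ofList v2)
          let u := PySem.Set.len (PySem.Set.ofList (kv.2 ++ v2))
          (t.1 + (n1 + n2 - u), t.2.1 + (u - n2), t.2.2 + (u - n1))) t
      = (t.1 + (L.map (fun kv =>
            match d2.get? kv.1 with
            | none => 0
            | some v2 => PySem.Set.len (PySem.Set.ofList kv.2) + PySem.Set.len (PySem.Set.ofList v2)
                          - PySem.Set.len (PySem.Set.ofList (kv.2 ++ v2)))).sum,
         t.2.1 + (L.map (fun kv =>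
            match d2.get? kv.1 with
            | none => PySem.List.len kv.2
            | some v2 => PySem.Set.len (PySem.Set.ofList (kv.2 ++ v2))
                          - PySem.Set.len (PySem.Set.ofList v2))).sum,
         t.2.2 + (L.map (fun kv =>
            match d2.get? kv.1 with
            | none => 0
            | some v2 => PySem.Set.len (PySem.Set.ofList (kv.2 ++ v2))
                          - PySem.Set.len (PySem.Set.ofList kv.2))).sum) := by
  intro L
  induction L with
  | nil => intro t; simp
  | cons kv L ih =>
    intro t
    simp only [List.foldl_cons, List.map_cons, List.sum_cons]
    cases h : d2.get? kv.1 with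
    | none => rw [ih]; simp [add_assoc]
    | some v2 => rw [ih]; simp only; refine Prod.ext ?_ (Prod.ext ?_ ?_) <;> simp <;> ring

-- B's second loop: an Int fold is the sum.
theorem pv_B_loop2 (d1 : PySem.Dict String (List String)) :
    ∀ (L : List (String × List String)) (c : Int),
      L.foldl (fun (c : Int) kv =>
        if ¬ d1.contains kv.1 then c + PySem.List.len kv.2 else c) c
      = c + (L.map (fun kv =>
           if ¬ d1.contains kv.1 then PySem.List.len kv.2 else 0)).sum := by
  intro L
  induction L with
  | nil => intro c; simp
  | cons kv L ih =>
    intro c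
    simp only [List.foldl_cons, List.map_cons, List.sum_cons]
    split_ifs with h <;> rw [ih] <;> ring

-- Cardinality bridge: PySem sets as Finsets.
theorem pv_toFinset_ofList (l : List String) : (PySem.Set.ofList l).toFinset = l.toFinset := by
  ext x; simp [List.mem_toFinset, PySem.Set.mem_ofList]

theorem pv_len_ofList (l : List String) : (PySem.Set.ofList l).length = l.toFinset.card := by
  rw [← pv_toFinset_ofList, List.toFinset_card_of_nodup (PySem.Set.nodup_ofList l)]

-- Inclusion-exclusion: |A ∩ B| = |A| + |B| - |A ∪ B|.
theorem pv_len_inter (v1 v2 : List String) :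
    PySem.Set.len (PySem.Set.inter (PySem.Set.ofList v1) (PySem.Set.ofList v2))
      = PySem.Set.len (PySem.Set.ofList v1) + PySem.Set.len (PySem.Set.ofList v2)
        - PySem.Set.len (PySem.Set.ofList (v1 ++ v2)) := by
  have h1 : (PySem.Set.inter (PySem.Set.ofList v1) (PySem.Set.ofList v2)).length
      = (v1.toFinset ∩ v2.toFinset).card := by
    rw [← List.toFinset_card_of_nodup (PySem.Set.nodup_inter _ _ (PySem.Set.nodup_ofList v1))]
    congr 1
    ext x
    simp [List.mem_toFinset, PySem.Set.mem_inter, PySem.Set.mem_ofList]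
  have h2 : (PySem.Set.ofList (v1 ++ v2)).length = (v1.toFinset ∪ v2.toFinset).card := by
    rw [pv_len_ofList, List.toFinset_append]
  have hie := Finset.card_inter_add_card_union v1.toFinset v2.toFinset
  simp only [PySem.Set.len, h1, h2, pv_len_ofList]
  omega

-- |A \ B| = |A ∪ B| - |B|.
theorem pv_len_diff (v1 v2 : List String) :
    PySem.Set.len (PySem.Set.diff (PySem.Set.ofList v1) (PySem.Set.ofList v2))
      = PySem.Set.len (PySem.Set.ofList (v1 ++ v2)) - PySem.Set.len (PySem.Set.ofList v2) := by
  have h1 : (PySem.Set.diff (PySem.Set.ofList v1) (PySem.Set.ofList v2)).length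
      = (v1.toFinset \ v2.toFinset).card := by
    rw [← List.toFinset_card_of_nodup (PySem.Set.nodup_diff _ _ (PySem.Set.nodup_ofList v1))]
    congr 1
    ext x
    simp [List.mem_toFinset, PySem.Set.mem_diff, PySem.Set.mem_ofList]
  have h2 : (PySem.Set.ofList (v1 ++ v2)).length = (v1.toFinset ∪ v2.toFinset).card := by
    rw [pv_len_ofList, List.toFinset_append]
  have hsd := Finset.card_sdiff_add_card v1.toFinset v2.toFinset
  simp only [PySem.Set.len, h1, h2, pv_len_ofList]
  omega

-- |B \ A| = |A ∪ B| - |A|  (union size taken over v1 ++ v2, as B computes it).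
theorem pv_len_diff' (v1 v2 : List String) :
    PySem.Set.len (PySem.Set.diff (PySem.Set.ofList v2) (PySem.Set.ofList v1))
      = PySem.Set.len (PySem.Set.ofList (v1 ++ v2)) - PySem.Set.len (PySem.Set.ofList v1) := by
  rw [pv_len_diff v2 v1]
  have : (PySem.Set.ofList (v2 ++ v1)).length = (PySem.Set.ofList (v1 ++ v2)).length := by
    rw [pv_len_ofList, pv_len_ofList, List.toFinset_append, List.toFinset_append, Finset.union_comm]
  simp only [PySem.Set.len]
  omega

-- Σ (f + g) = Σ f + Σ g over a list map.
theorem pv_sum_map_add {α : Type} (l : List α) (f g : α → Int) :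
    (l.map (fun x => f x + g x)).sum = (l.map f).sum + (l.map g).sum := by
  induction l with
  | nil => simp
  | cons x l ih => simp [ih]; ring

-- Σ over a list of guarded terms = Σ over the filtered list.
theorem pv_sum_if_filter {α : Type} (l : List α) (p : α → Bool) (f : α → Int) :
    (l.map (fun x => if p x then f x else 0)).sum = ((l.filter p).map f).sum := by
  induction l with
  | nil => simp
  | cons x l ih =>
    by_cases h : p x <;> simp [h, ih]

-- The shared-key sum taken over dA's items equals the same sum over the shared keys of dA,
-- with the per-key value H looking both lists up via getD.
theorem pv_shared_sum (dA dB : PySem.Dict String (List String)) (hndA : dA.keys.Nodup)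
    (H : String → Int) :
    (dA.items.map (fun kv => if dB.contains kv.1 then H kv.1 else 0)).sum
      = ((dA.keys.filter (fun k => dB.contains k)).map H).sum := by
  rw [PySem.Dict.items_eq_map_keys dA hndA [], List.map_map, ← pv_sum_if_filter]
  apply congrArg List.sum
  apply List.map_congr_left
  intro k _
  rfl

-- The shared keys of d1 and of d2 are the same finite set, hence a permutation; integer sums agree.
theorem pv_shared_perm (d1 d2 : PySem.Dict String (List String))
    (hnd1 : d1.keys.Nodup) (hnd2 : d2.keys.Nodup) (H : String → Int) :
    ((d1.keys.filter (fun k => d2.contains k)).map H).sum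
      = ((d2.keys.filter (fun k => d1.contains k)).map H).sum := by
  have hperm : (d1.keys.filter (fun k => d2.contains k)).Perm
      (d2.keys.filter (fun k => d1.contains k)) := by
    rw [List.perm_ext_iff_of_nodup (hnd1.filter _) (hnd2.filter _)]
    intro k
    simp only [List.mem_filter, ← PySem.Dict.contains_iff_mem_keys]
    tauto
  exact (hperm.map H).sum_eq

-- ===== VERDICT (by name: the statement is the Claim_ definition above) =====
theorem compute_list_operations_spec : Claim_equal_compute_list_operations := by
  intro dict1 dict2 _
  unfold Spec_compute_list_operations compute_list_operations compute_list_operations_alt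
  dsimp only
  have hnd1 := PySem.Dict.nodup_keys_ofList dict1
  have hnd2 := PySem.Dict.nodup_keys_ofList dict2
  set d1 := PySem.Dict.ofList dict1 with hd1
  set d2 := PySem.Dict.ofList dict2 with hd2
  rw [pv_B_loop1, pv_B_loop2]
  have e1 : (fun (acc : PySem.Dict String (List String)) key =>
      if d2.contains key then
        let common_elements := PySem.Set.inter (PySem.Set.ofList (d1.getD key [])) (PySem.Set.ofList (d2.getD key []))
        if common_elements ≠ [] then acc.insert key common_elements else acc
      else acc)
      = pvStepF (fun k =>
          if d2.contains k then
            let c := PySem.Set.inter (PySem.Set.ofList (d1.getD k [])) (PySem.Set.ofList (d2.getD k []))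
            if c ≠ [] then some c else none
          else none) := by
    funext a k
    simp only [pvStepF]
    split_ifs <;> rfl
  have e2 : ∀ (dA dB : PySem.Dict String (List String)), (fun (acc : PySem.Dict String (List String)) key =>
      if ¬ dB.contains key then acc.insert key (dA.getD key [])
      else
        let difference := PySem.Set.diff (PySem.Set.ofList (dA.getD key [])) (PySem.Set.ofList (dB.getD key []))
        if difference ≠ [] then acc.insert key difference else acc)
      = pvStepF (fun k =>
          if ¬ dB.contains k then some (dA.getD k [])
          else
            let c := PySem.Set.diff (PySem.Set.ofList (dA.getD k [])) (PySem.Set.ofList (dB.getD k []))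
            if c ≠ [] then some c else none) := by
    intro dA dB
    funext a k
    simp only [pvStepF]
    split_ifs <;> rfl
  rw [e1, e2 d1 d2, e2 d2 d1]
  rw [pv_key_sum d1 d2 hnd1 PySem.Set.inter]
  rw [pv_key_sum_diff d1 d2 hnd1]
  rw [pv_key_sum_diff d2 d1 hnd2]
  refine Prod.ext ?_ (Prod.ext ?_ ?_)
  · -- intersection: termwise inclusion-exclusion
    simp only [zero_add]
    apply congrArg List.sum
    apply List.map_congr_left
    intro kv _
    cases h : d2.get? kv.1 with
    | none => rfl
    | some v2 => exact pv_len_inter kv.2 v2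
  · -- dict1 minus dict2: termwise |A\B| = u - n2
    simp only [zero_add]
    apply congrArg List.sum
    apply List.map_congr_left
    intro kv _
    cases h : d2.get? kv.1 with
    | none => rfl
    | some v2 => exact pv_len_diff kv.2 v2
  · -- dict2 minus dict1: split A's single sum over d2 into shared + unshared,
    -- move the shared part to a sum over d1's items via the key permutation.
    simp only [zero_add]
    have hsplit : (d2.items.map (fun kv =>
        match d1.get? kv.1 with
        | none => PySem.List.len kv.2
        | some v1 => PySem.Set.len (PySem.Set.diff (PySem.Set.ofList kv.2) (PySem.Set.ofList v1)))).sum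
        = (d2.items.map (fun kv => if d1.contains kv.1 then
              PySem.Set.len (PySem.Set.diff (PySem.Set.ofList (d2.getD kv.1 [])) (PySem.Set.ofList (d1.getD kv.1 []))) else 0)).sum
          + (d2.items.map (fun kv => if ¬ d1.contains kv.1 then PySem.List.len kv.2 else 0)).sum := by
      rw [← pv_sum_map_add]
      apply congrArg List.sum
      apply List.map_congr_left
      intro kv hkv
      have hg2 : d2.getD kv.1 [] = kv.2 := PySem.Dict.getD_of_mem_items d2 hkv hnd2 []
      cases h : d1.get? kv.1 with
      | none =>
        have hc : d1.contains kv.1 = false := by rw [PySem.Dict.contains_eq_isSome_get?, h]; rfl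
        simp [hc]
      | some v1 =>
        have hc : d1.contains kv.1 = true := by rw [PySem.Dict.contains_eq_isSome_get?, h]; rfl
        have hg1 : d1.getD kv.1 [] = v1 := PySem.Dict.getD_of_get?_eq_some d1 [] h
        simp [hc, hg1, hg2]
    rw [hsplit]
    have hshared : (d2.items.map (fun kv => if d1.contains kv.1 then
          PySem.Set.len (PySem.Set.diff (PySem.Set.ofList (d2.getD kv.1 [])) (PySem.Set.ofList (d1.getD kv.1 []))) else 0)).sum
        = (d1.items.map (fun kv =>
            match d2.get? kv.1 with
            | none => 0
            | some v2 => PySem.Set.len (PySem.Set.ofList (kv.2 ++ v2))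
                          - PySem.Set.len (PySem.Set.ofList kv.2))).sum := by
      rw [pv_shared_sum d2 d1 hnd2 (fun k => PySem.Set.len (PySem.Set.diff (PySem.Set.ofList (d2.getD k [])) (PySem.Set.ofList (d1.getD k [])))),
        ← pv_shared_perm d1 d2 hnd1 hnd2 (fun k => PySem.Set.len (PySem.Set.diff (PySem.Set.ofList (d2.getD k [])) (PySem.Set.ofList (d1.getD k [])))),
        ← pv_shared_sum d1 d2 hnd1 (fun k => PySem.Set.len (PySem.Set.diff (PySem.Set.ofList (d2.getD k [])) (PySem.Set.ofList (d1.getD k []))))]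
      apply congrArg List.sum
      apply List.map_congr_left
      intro kv hkv
      have hg1 : d1.getD kv.1 [] = kv.2 := PySem.Dict.getD_of_mem_items d1 hkv hnd1 []
      cases h : d2.get? kv.1 with
      | none =>
        have hc : d2.contains kv.1 = false := by rw [PySem.Dict.contains_eq_isSome_get?, h]; rfl
        simp [hc]
      | some v2 =>
        have hc : d2.contains kv.1 = true := by rw [PySem.Dict.contains_eq_isSome_get?, h]; rfl
        have hg2 : d2.getD kv.1 [] = v2 := PySem.Dict.getD_of_get?_eq_some d2 [] h
        simp only [hc, if_true, hg1, hg2]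
        exact pv_len_diff' kv.2 v2
    rw [hshared]
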